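-- pv_equiv track=rewrite | github.com/tomasvanagas/prime-research | experiments/wildcard/batch_mobius_sieve.py | squarefree_divisors_with_mu
-- ===== SOURCE A (Python) =====
-- def squarefree_divisors_with_mu(prime_list):
--     """
--     Generate all squarefree divisors of the product of prime_list,
--     along with their Mobius value.
--     Since the primes are distinct, every subset gives a squarefree divisor.
--     mu(d) = (-1)^{number of prime factors of d}.
--     """
--     result = [(1, 1)]  # (divisor, mu_value)
--     for p in prime_list:
--         new = []
--         for d, mu in result:
--             new.append((d * p, -mu))
--         result.extend(new)
--     return result
-- ===== SOURCE B (Python) =====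
-- def squarefree_divisors_with_mu(prime_list):
--     """Direct per-subset construction: mask k in [0, 2^n) selects the primes
--     whose bit is set; this enumerates exactly A's output order."""
--     out = []
--     for mask in range(1 << len(prime_list)):
--         d, mu, m = 1, 1, mask
--         for p in prime_list:
--             if m & 1:
--                 d *= p
--                 mu = -mu
--             m >>= 1
--         out.append((d, mu))
--     return out
-- ===== Notes on version B (the rewrite author's own statement) =====
-- stated objective: alternative
-- what changed: Replaces A's incremental list-doubling (each prime appends p-multiplied copies of the whole list so far) with direct per-bitmask subset construction: for each mask in range(2^n) one inner pass over the primes multiplies in the selected ones and flips mu per selected bit, emitting the same values in the same binary-counting order.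
import Mathlib
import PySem

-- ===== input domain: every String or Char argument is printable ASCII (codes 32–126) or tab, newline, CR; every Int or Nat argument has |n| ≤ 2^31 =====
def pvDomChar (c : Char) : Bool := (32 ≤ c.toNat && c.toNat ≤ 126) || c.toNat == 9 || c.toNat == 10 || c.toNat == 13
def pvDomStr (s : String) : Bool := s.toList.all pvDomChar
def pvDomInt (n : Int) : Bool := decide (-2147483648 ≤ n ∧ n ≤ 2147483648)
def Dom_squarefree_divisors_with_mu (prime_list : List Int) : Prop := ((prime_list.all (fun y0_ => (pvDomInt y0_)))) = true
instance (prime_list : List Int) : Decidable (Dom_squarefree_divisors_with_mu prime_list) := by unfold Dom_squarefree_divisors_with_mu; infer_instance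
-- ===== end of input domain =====

-- B replaces A's incremental list-doubling with direct per-bitmask subset construction
-- (same output values and order); objective: alternative decomposition, not speed.

-- ===== PORT A =====
-- A: start from [(1,1)]; for each prime p, append the p-multiplied copies of the current list.
def squarefree_divisors_with_mu (prime_list : List Int) : List (Int × Int) :=
  prime_list.foldl
    (fun result p => result ++ result.map (fun dm => (dm.1 * p, -dm.2)))
    [(1, 1)]

-- ===== PORT B =====
-- inner loop of Source B: state (d, mu, m); for each prime p: if m & 1 then multiply/negate; m >>= 1.
def pvBLoop (prime_list : List Int) (mask : Int) : Int × Int × Int :=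
  prime_list.foldl
    (fun st p =>
      if PySem.Int.band st.2.2 1 = 1 then (st.1 * p, -st.2.1, st.2.2 >>> 1)
      else (st.1, st.2.1, st.2.2 >>> 1))
    (1, 1, mask)

-- Source B: for mask in range(1 << len(prime_list)): run the inner loop, emit (d, mu).
def squarefree_divisors_with_mu_alt (prime_list : List Int) : List (Int × Int) :=
  (PySem.List.pyRange 0 ((1 : Int) <<< prime_list.length) 1).map
    (fun mask => ((pvBLoop prime_list mask).1, (pvBLoop prime_list mask).2.1))

-- ===== PRECONDITION & SPEC =====
def Spec_squarefree_divisors_with_mu (prime_list : List Int) (out : List (Int × Int)) : Prop := out = squarefree_divisors_with_mu_alt prime_list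
instance (prime_list : List Int) (out : List (Int × Int)) : Decidable (Spec_squarefree_divisors_with_mu prime_list out) := by unfold Spec_squarefree_divisors_with_mu; infer_instance

-- ===== CLAIM (what is proved, stated in full; the proofs are below) =====
def Claim_equal_squarefree_divisors_with_mu : Prop := ∀ (prime_list : List Int), Dom_squarefree_divisors_with_mu prime_list → Spec_squarefree_divisors_with_mu prime_list (squarefree_divisors_with_mu prime_list)

-- ===== LEMMAS AND PROOFS =====

-- casting facts
lemma pv_cast_shiftRight (m : Nat) : ((m : Int) >>> 1) = ((m / 2 : Nat) : Int) := by
  rw [show ((m : Int) >>> 1) = ((m >>> 1 : Nat) : Int) from rfl]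
  norm_num [Nat.shiftRight_eq_div_pow]

lemma pv_band_cast_one (m : Nat) : PySem.Int.band (m : Int) 1 = ((m % 2 : Nat) : Int) := by
  have := PySem.Int.band_natCast m 1
  simpa [Nat.and_one_is_mod] using this

-- the inner loop splits a mask k + 2^len * c: the (d, mu) part only sees k, the residual carries c
lemma pv_bloop_split (ps : List Int) : ∀ (d mu : Int) (k c : Nat),
    ps.foldl
      (fun st p =>
        if PySem.Int.band st.2.2 1 = 1 then (st.1 * p, -st.2.1, st.2.2 >>> 1)
        else (st.1, st.2.1, st.2.2 >>> 1))
      (d, mu, ((k + 2 ^ ps.length * c : Nat) : Int))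
    = ((ps.foldl
        (fun st p =>
          if PySem.Int.band st.2.2 1 = 1 then (st.1 * p, -st.2.1, st.2.2 >>> 1)
          else (st.1, st.2.1, st.2.2 >>> 1))
        (d, mu, ((k : Nat) : Int))).1,
       (ps.foldl
        (fun st p =>
          if PySem.Int.band st.2.2 1 = 1 then (st.1 * p, -st.2.1, st.2.2 >>> 1)
          else (st.1, st.2.1, st.2.2 >>> 1))
        (d, mu, ((k : Nat) : Int))).2.1,
       ((k / 2 ^ ps.length + c : Nat) : Int)) := by
  induction ps with
  | nil => intro d mu k c; simp
  | cons p ps ih =>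
    intro d mu k c
    have hmul : 2 ^ (p :: ps).length * c = 2 * (2 ^ ps.length * c) := by
      simp [pow_succ]; ring
    have hM2 : (k + 2 ^ (p :: ps).length * c) % 2 = k % 2 := by
      rw [hmul]; omega
    have hMd : (k + 2 ^ (p :: ps).length * c) / 2 = k / 2 + 2 ^ ps.length * c := by
      rw [hmul]; omega
    have hdd : k / 2 / 2 ^ ps.length + c = k / 2 ^ (p :: ps).length + c := by
      rw [Nat.div_div_eq_div_mul]
      simp [pow_succ, Nat.mul_comm]
    simp only [List.foldl_cons, pv_band_cast_one, pv_cast_shiftRight, hM2, hMd]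
    by_cases h : k % 2 = 1
    · rw [h]
      simp only [Nat.cast_one]
      simp only [reduceIte]
      rw [ih (d * p) (-mu) (k / 2) c, hdd]
    · have h0 : k % 2 = 0 := by omega
      rw [h0]
      simp only [Nat.cast_zero]
      simp only [show ((0:Int) = 1) = False by norm_num, reduceIte]
      rw [ih d mu (k / 2) c, hdd]

-- the residual of the inner loop over ps at mask k is k / 2^|ps|
lemma pv_bloop_third (ps : List Int) (k : Nat) :
    pvBLoop ps (k : Int)
    = ((pvBLoop ps (k : Int)).1, (pvBLoop ps (k : Int)).2.1, ((k / 2 ^ ps.length : Nat) : Int)) := by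
  have := pv_bloop_split ps 1 1 k 0
  simpa [pvBLoop] using this

-- splitting off prime p at the end of the list
lemma pv_bloop_append (ps : List Int) (p : Int) (m : Int) :
    pvBLoop (ps ++ [p]) m
    = (if PySem.Int.band (pvBLoop ps m).2.2 1 = 1
        then ((pvBLoop ps m).1 * p, -(pvBLoop ps m).2.1, (pvBLoop ps m).2.2 >>> 1)
        else ((pvBLoop ps m).1, (pvBLoop ps m).2.1, (pvBLoop ps m).2.2 >>> 1)) := by
  simp [pvBLoop, List.foldl_append]

-- A's doubling fold equals the per-mask map over List.range (2 ^ length)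
lemma pv_main (ps : List Int) :
    squarefree_divisors_with_mu ps
    = (List.range (2 ^ ps.length)).map
        (fun (k : Nat) => ((pvBLoop ps (k : Int)).1, (pvBLoop ps (k : Int)).2.1)) := by
  induction ps using List.reverseRecOn with
  | nil => decide
  | append_singleton ps p ih =>
    have hn : (ps ++ [p]).length = ps.length + 1 := by simp
    have hpow : 2 ^ (ps ++ [p]).length = 2 ^ ps.length + 2 ^ ps.length := by
      rw [hn, pow_succ]; ring
    unfold squarefree_divisors_with_mu at ih ⊢
    rw [List.foldl_append, List.foldl_cons, List.foldl_nil, ih, hpow, List.range_add,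
      List.map_append, List.map_map]
    congr 1
    · -- first half: masks below 2^|ps| leave the new prime out
      refine List.map_congr_left (fun k hk => ?_)
      have hk' : k < 2 ^ ps.length := List.mem_range.mp hk
      have hz : k / 2 ^ ps.length = 0 := Nat.div_eq_of_lt hk'
      rw [pv_bloop_append, pv_bloop_third ps k, hz]
      simp [show PySem.Int.band (0 : Int) 1 = 0 from by decide]
    · -- second half: masks 2^|ps| + k multiply the new prime in
      rw [List.map_map]
      refine List.map_congr_left (fun k hk => ?_)
      have hk' : k < 2 ^ ps.length := List.mem_range.mp hk
      have hone : k / 2 ^ ps.length + 1 = 1 := by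
        rw [Nat.div_eq_of_lt hk']
      have hsplit := pv_bloop_split ps 1 1 k 1
      have hcast : ((2 ^ ps.length + k : Nat) : Int) = ((k + 2 ^ ps.length * 1 : Nat) : Int) := by
        norm_num [Nat.add_comm]
      simp only [Function.comp_apply, pv_bloop_append]
      have hres : pvBLoop ps ((2 ^ ps.length + k : Nat) : Int)
          = ((pvBLoop ps (k : Int)).1, (pvBLoop ps (k : Int)).2.1, (1 : Int)) := by
        rw [hcast]
        simpa [pvBLoop, hone] using hsplit
      rw [hres]
      simp

-- ===== VERDICT (by name: the statement is the Claim_ definition above) =====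
theorem squarefree_divisors_with_mu_spec : Claim_equal_squarefree_divisors_with_mu := by
  intro ps _
  unfold Spec_squarefree_divisors_with_mu squarefree_divisors_with_mu_alt
  have hshift : ((1 : Int) <<< ps.length) = ((2 ^ ps.length : Nat) : Int) := by
    simp [Int.shiftLeft_eq]
  rw [hshift, PySem.List.pyRange_zero_nat, List.map_map, pv_main]
  rfl
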